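-- pv_equiv track=rewrite | github.com/Vipul-Intellect/Skillyfy-Agent | tools/mcp_tools/schedule.py | _get_difficulty_progression
-- ===== SOURCE A (Python) =====
-- def _get_difficulty_progression(level: str, total_days: int) -> list:
--     """Get difficulty progression for each day"""
--     if level.lower() == "beginner":
--         # Start easy, gradually increase
--         difficulties = []
--         for i in range(total_days):
--             if i < total_days // 3:
--                 difficulties.append("Easy")
--             elif i < 2 * total_days // 3:
--                 difficulties.append("Medium")
--             else:
--                 difficulties.append("Hard")
--         return difficulties
--
--     elif level.lower() == "intermediate":
--         difficulties = []
--         for i in range(total_days):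
--             if i < total_days // 2:
--                 difficulties.append("Medium")
--             else:
--                 difficulties.append("Hard")
--         return difficulties
--
--     else:  # Advanced
--         return ["Hard"] * total_days
-- ===== SOURCE B (Python) =====
-- def _get_difficulty_progression(level: str, total_days: int) -> list:
--     """Get difficulty progression for each day"""
--     if level.lower() == "beginner":
--         e = total_days // 3
--         m = 2 * total_days // 3 - total_days // 3
--         h = total_days - 2 * total_days // 3
--         return ["Easy"] * e + ["Medium"] * m + ["Hard"] * h
--     elif level.lower() == "intermediate":
--         m = total_days // 2
--         return ["Medium"] * m + ["Hard"] * (total_days - m)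
--     else:  # Advanced
--         return ["Hard"] * total_days
-- ===== Notes on version B (the rewrite author's own statement) =====
-- stated objective: simpler
-- what changed: Replaced the per-day loop that classifies each index i against floor-division thresholds by a direct construction that computes the three block lengths from the same thresholds and concatenates repeated-element lists.
import Mathlib
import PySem

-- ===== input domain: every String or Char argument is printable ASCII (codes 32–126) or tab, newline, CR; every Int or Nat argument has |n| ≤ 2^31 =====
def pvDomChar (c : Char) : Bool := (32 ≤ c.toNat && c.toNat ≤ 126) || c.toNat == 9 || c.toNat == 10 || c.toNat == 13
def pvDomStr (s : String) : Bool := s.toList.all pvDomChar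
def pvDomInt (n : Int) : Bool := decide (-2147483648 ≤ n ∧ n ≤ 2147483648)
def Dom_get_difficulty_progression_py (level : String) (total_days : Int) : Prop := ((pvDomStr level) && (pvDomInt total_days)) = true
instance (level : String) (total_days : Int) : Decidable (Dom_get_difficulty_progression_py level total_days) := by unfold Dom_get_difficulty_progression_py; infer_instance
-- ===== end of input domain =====

-- B replaces the per-day classification loop by concatenating repeated-element blocks whose
-- lengths come from the same floor-division thresholds (objective: simpler).

-- ===== PORT A =====
def get_difficulty_progression_py (level : String) (total_days : Int) : List String :=
  if PySem.Str.lower level = "beginner" then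
    (PySem.List.pyRange 0 total_days 1).foldl (fun difficulties i =>
      if i < PySem.Int.floordiv total_days 3 then difficulties ++ ["Easy"]
      else if i < PySem.Int.floordiv (2 * total_days) 3 then difficulties ++ ["Medium"]
      else difficulties ++ ["Hard"]) []
  else if PySem.Str.lower level = "intermediate" then
    (PySem.List.pyRange 0 total_days 1).foldl (fun difficulties i =>
      if i < PySem.Int.floordiv total_days 2 then difficulties ++ ["Medium"]
      else difficulties ++ ["Hard"]) []
  else
    PySem.List.pyRepeat ["Hard"] total_days

-- ===== PORT B =====
def get_difficulty_progression_py_alt (level : String) (total_days : Int) : List String :=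
  if PySem.Str.lower level = "beginner" then
    let e := PySem.Int.floordiv total_days 3
    let m := PySem.Int.floordiv (2 * total_days) 3 - PySem.Int.floordiv total_days 3
    let h := total_days - PySem.Int.floordiv (2 * total_days) 3
    PySem.List.pyRepeat ["Easy"] e ++ PySem.List.pyRepeat ["Medium"] m ++ PySem.List.pyRepeat ["Hard"] h
  else if PySem.Str.lower level = "intermediate" then
    let m := PySem.Int.floordiv total_days 2
    PySem.List.pyRepeat ["Medium"] m ++ PySem.List.pyRepeat ["Hard"] (total_days - m)
  else
    PySem.List.pyRepeat ["Hard"] total_days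

-- ===== PRECONDITION & SPEC =====
def Spec_get_difficulty_progression_py (level : String) (total_days : Int) (out : List String) : Prop := out = get_difficulty_progression_py_alt level total_days
instance (level : String) (total_days : Int) (out : List String) : Decidable (Spec_get_difficulty_progression_py level total_days out) := by unfold Spec_get_difficulty_progression_py; infer_instance

-- ===== CLAIM (what is proved, stated in full; the proofs are below) =====
def Claim_equal_get_difficulty_progression_py : Prop := ∀ (level : String) (total_days : Int), Dom_get_difficulty_progression_py level total_days → Spec_get_difficulty_progression_py level total_days (get_difficulty_progression_py level total_days)

-- ===== LEMMAS AND PROOFS =====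

-- ===== VERDICT (by name: the statement is the Claim_ definition above) =====

-- a range whose every element maps to the same string maps to a replicate block
lemma map_const_pyRange (a b : Int) (f : Int → String) (c : String)
    (h : ∀ i, a ≤ i → i < b → f i = c) :
    (PySem.List.pyRange a b 1).map f = List.replicate (b - a).toNat c := by
  have h1 : (PySem.List.pyRange a b 1).map f
      = (PySem.List.pyRange a b 1).map (fun _ => c) := by
    apply List.map_congr_left
    intro i hi
    rw [PySem.List.mem_pyRange_one] at hi
    exact h i hi.1 hi.2
  rw [h1, List.map_const', PySem.List.length_pyRange_one]

theorem get_difficulty_progression_py_spec : Claim_equal_get_difficulty_progression_py := by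
  intro level total_days _
  unfold Spec_get_difficulty_progression_py get_difficulty_progression_py get_difficulty_progression_py_alt
  by_cases hn : total_days ≤ 0
  · have hr : PySem.List.pyRange 0 total_days 1 = [] := PySem.List.pyRange_one_eq_nil hn
    have d3 := PySem.Int.floordiv_eq_ediv_of_pos (a := total_days) (b := 3) (by omega)
    have d3' := PySem.Int.floordiv_eq_ediv_of_pos (a := 2 * total_days) (b := 3) (by omega)
    have d2 := PySem.Int.floordiv_eq_ediv_of_pos (a := total_days) (b := 2) (by omega)
    split_ifs <;>
      simp [hr, PySem.List.pyRepeat_singleton] <;>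
      constructor <;> omega
  · push Not at hn
    have d3 := PySem.Int.floordiv_eq_ediv_of_pos (a := total_days) (b := 3) (by omega)
    have d3' := PySem.Int.floordiv_eq_ediv_of_pos (a := 2 * total_days) (b := 3) (by omega)
    have d2 := PySem.Int.floordiv_eq_ediv_of_pos (a := total_days) (b := 2) (by omega)
    have ha : (0:Int) ≤ total_days / 3 := by omega
    have hab : total_days / 3 ≤ 2 * total_days / 3 := by omega
    have hbn : 2 * total_days / 3 ≤ total_days := by omega
    have hbn' : total_days / 3 ≤ total_days := by omega
    have h2a : (0:Int) ≤ total_days / 2 := by omega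
    have h2b : total_days / 2 ≤ total_days := by omega
    split_ifs
    · -- beginner
      have hf : ∀ (acc : List String) (i : Int),
          (if i < PySem.Int.floordiv total_days 3 then acc ++ ["Easy"]
           else if i < PySem.Int.floordiv (2 * total_days) 3 then acc ++ ["Medium"]
           else acc ++ ["Hard"])
          = acc ++ [if i < total_days / 3 then "Easy"
                    else if i < 2 * total_days / 3 then "Medium" else "Hard"] := by
        intro acc i; rw [d3, d3']; split_ifs <;> rfl
      simp only [hf, PySem.List.foldl_append_singleton_eq_map, List.nil_append]
      rw [PySem.List.pyRange_one_append 0 (total_days / 3) total_days ha hbn' ,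
          PySem.List.pyRange_one_append (total_days / 3) (2 * total_days / 3) total_days hab hbn,
          List.map_append, List.map_append]
      rw [map_const_pyRange 0 (total_days / 3) _ "Easy" (fun i h1 h2 => by split_ifs; rfl),
          map_const_pyRange (total_days / 3) (2 * total_days / 3) _ "Medium"
            (fun i h1 h2 => by split_ifs <;> first | rfl | omega),
          map_const_pyRange (2 * total_days / 3) total_days _ "Hard"
            (fun i h1 h2 => by split_ifs <;> first | rfl | omega)]
      simp only [PySem.List.pyRepeat_singleton, d3, d3', Int.sub_zero, List.append_assoc]
    · -- intermediate
      have hf : ∀ (acc : List String) (i : Int),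
          (if i < PySem.Int.floordiv total_days 2 then acc ++ ["Medium"]
           else acc ++ ["Hard"])
          = acc ++ [if i < total_days / 2 then "Medium" else "Hard"] := by
        intro acc i; rw [d2]; split_ifs <;> rfl
      simp only [hf, PySem.List.foldl_append_singleton_eq_map, List.nil_append]
      rw [PySem.List.pyRange_one_append 0 (total_days / 2) total_days h2a h2b, List.map_append]
      rw [map_const_pyRange 0 (total_days / 2) _ "Medium" (fun i h1 h2 => by split_ifs; rfl),
          map_const_pyRange (total_days / 2) total_days _ "Hard"
            (fun i h1 h2 => by split_ifs <;> first | rfl | omega)]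
      simp only [PySem.List.pyRepeat_singleton, d2, Int.sub_zero]
    · rfl
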